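-- pv_equiv track=rewrite | github.com/Yeop-Dong/CodingTest_Study | 프로그래머스/2/150368. 이모티콘 할인행사/이모티콘 할인행사.py | dfs
-- ===== SOURCE A (Python) =====
-- def calc(users, emoticons, discounts):
--     sub, sale = 0, 0
--     for user in users:
--         cur = 0
--         for i in range(len(emoticons)):
--             if user[0] <= discounts[i]:
--                 cur += emoticons[i] // 100 * (100 - discounts[i])
--         if user[1] <= cur:
--             sub += 1
--         else:
--             sale += cur
--     return sub, sale
--
-- def dfs(rates, users, emoticons, discounts):
--     best_sub, best_sale = 0, 0
--     if len(discounts) == len(emoticons):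
--         best_sub, best_sale = calc(users, emoticons, discounts)
--         return best_sub, best_sale
--
--     for r in rates:
--         sub, sale = dfs(rates, users, emoticons, discounts + [r])
--         if best_sub < sub:
--             best_sub, best_sale = sub, sale
--         elif best_sub == sub and best_sale <= sale:
--             best_sale = sale
--     return best_sub, best_sale
-- ===== SOURCE B (Python) =====
-- def calc(users, emoticons, discounts):
--     sub, sale = 0, 0
--     for user in users:
--         cur = 0
--         for i in range(len(emoticons)):
--             if user[0] <= discounts[i]:
--                 cur += emoticons[i] // 100 * (100 - discounts[i])
--         if user[1] <= cur:
--             sub += 1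
--         else:
--             sale += cur
--     return sub, sale
--
-- def dfs(rates, users, emoticons, discounts):
--     remaining = len(emoticons) - len(discounts)
--     if remaining == 0:
--         return calc(users, emoticons, discounts)
--     n = len(rates)
--     best_sub, best_sale = 0, 0
--     for code in range(n ** remaining):
--         # decode 'code' as a base-n numeral: its digits pick the remaining rates
--         digits = []
--         c = code
--         for _ in range(remaining):
--             digits.append(rates[c % n])
--             c //= n
--         digits.reverse()
--         sub, sale = calc(users, emoticons, discounts + digits)
--         if best_sub < sub or (best_sub == sub and best_sale <= sale):
--             best_sub, best_sale = sub, sale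
--     return best_sub, best_sale
-- ===== Notes on version B (the rewrite author's own statement) =====
-- stated objective: alternative
-- what changed: Replaces the recursive depth-first tree walk with a single flat loop over integer codes 0..len(rates)**remaining, decoding each code as a base-len(rates) numeral into the remaining discount slots, plus an early return when no slots remain.
-- outside the precondition, e.g. on dfs([], [], [], [0]): A returns (0, 0), B raises ZeroDivisionError
import Mathlib
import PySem

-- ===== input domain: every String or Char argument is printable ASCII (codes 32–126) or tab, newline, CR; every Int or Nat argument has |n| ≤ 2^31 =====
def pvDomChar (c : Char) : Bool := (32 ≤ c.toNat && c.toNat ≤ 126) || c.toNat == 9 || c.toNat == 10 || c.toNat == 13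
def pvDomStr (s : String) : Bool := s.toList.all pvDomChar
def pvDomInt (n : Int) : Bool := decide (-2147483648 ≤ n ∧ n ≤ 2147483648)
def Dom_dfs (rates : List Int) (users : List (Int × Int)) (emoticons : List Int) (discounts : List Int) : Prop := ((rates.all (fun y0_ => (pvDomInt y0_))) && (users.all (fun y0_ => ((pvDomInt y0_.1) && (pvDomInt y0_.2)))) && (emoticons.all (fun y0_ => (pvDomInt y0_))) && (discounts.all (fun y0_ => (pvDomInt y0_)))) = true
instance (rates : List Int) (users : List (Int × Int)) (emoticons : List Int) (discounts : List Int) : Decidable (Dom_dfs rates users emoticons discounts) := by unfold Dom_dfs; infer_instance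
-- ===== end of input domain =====

-- B replaces A's recursive tree walk by one flat loop over base-n integer codes (same cost, different decomposition).
-- Pre_ excludes discount lists longer than emoticons (there A recurses forever for nonempty rates, or returns an
-- accidental (0,0) for empty rates, while B's negative exponent raises).


-- ===== PORT A =====
-- calc: both Pythons contain this exact helper; dfs only ever calls it with
-- len(discounts) == len(emoticons), so getD i 0 is exact there (index always in range).
-- (the lists are held as arrays so that the port's discounts[i]/emoticons[i] is O(1) as in Python, and the
-- two `for` loops are explicit tail recursions; same elements, same iteration order, same intermediate values)
def calcInner (u1 : Int) (es ds : Array Int) (i : Nat) (cur : Int) : Int :=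
  if i < es.size then
    calcInner u1 es ds (i + 1)
      (if u1 ≤ ds.getD i 0 then cur + PySem.Int.floordiv (es.getD i 0) 100 * (100 - ds.getD i 0) else cur)
  else cur
  termination_by es.size - i

def calcOuter (users : List (Int × Int)) (es ds : Array Int) (sub sale : Int) : Int × Int :=
  match users with
  | [] => (sub, sale)
  | user :: rest =>
    let cur := calcInner user.1 es ds 0 0
    if user.2 ≤ cur then calcOuter rest es ds (sub + 1) sale
    else calcOuter rest es ds sub (sale + cur)

def calcPy (users : List (Int × Int)) (emoticons : List Int) (discounts : List Int) : Int × Int :=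
  calcOuter users emoticons.toArray discounts.toArray 0 0

-- A's recursion, with a fuel counter for totality: inside Pre_ the initial fuel
-- (emoticons.length - discounts.length + 1) is never exhausted, so the fuel-0 branch is unreachable.
def dfsFuel (fuel : Nat) (rates : List Int) (users : List (Int × Int)) (emoticons : List Int) (discounts : List Int) : Int × Int :=
  match fuel with
  | 0 => (0, 0)
  | fuel + 1 =>
    if discounts.length = emoticons.length then calcPy users emoticons discounts
    else
      rates.foldl (fun best r =>
        let s := dfsFuel fuel rates users emoticons (discounts ++ [r])
        if best.1 < s.1 then s
        else if best.1 = s.1 ∧ best.2 ≤ s.2 then (best.1, s.2)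
        else best) (0, 0)

def dfs (rates : List Int) (users : List (Int × Int)) (emoticons : List Int) (discounts : List Int) : Int × Int :=
  dfsFuel (emoticons.length - discounts.length + 1) rates users emoticons discounts

-- ===== PORT B =====
-- B's digit loop: digits.append(rates[c % n]); c //= n, repeated `remaining` times (least significant first).
def digitsLoop (rates : List Int) : Nat → Nat → List Int
  | 0, _ => []
  | k + 1, c => rates.getD (c % rates.length) 0 :: digitsLoop rates k (c / rates.length)

def dfs_alt (rates : List Int) (users : List (Int × Int)) (emoticons : List Int) (discounts : List Int) : Int × Int :=
  let remaining := emoticons.length - discounts.length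
  if remaining = 0 then calcPy users emoticons discounts
  else
    let n := rates.length
    (List.range (n ^ remaining)).foldl (fun best code =>
      let digits := (digitsLoop rates remaining code).reverse
      let s := calcPy users emoticons (discounts ++ digits)
      if best.1 < s.1 ∨ (best.1 = s.1 ∧ best.2 ≤ s.2) then s else best) (0, 0)

-- ===== PRECONDITION & SPEC =====
-- Pre_ excludes discount lists longer than emoticons: there Python A never reaches its base case, so it
-- recurses forever (RecursionError) whenever rates is nonempty, and for empty rates returns an accidental
-- (0,0) while B raises (negative exponent); see claim.json "cites".
def Pre_dfs (rates : List Int) (users : List (Int × Int)) (emoticons : List Int) (discounts : List Int) : Prop :=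
  discounts.length ≤ emoticons.length
instance (rates : List Int) (users : List (Int × Int)) (emoticons : List Int) (discounts : List Int) : Decidable (Pre_dfs rates users emoticons discounts) := by unfold Pre_dfs; infer_instance

def pvWitness_dfs : List Int × (List (Int × Int)) × List Int × List Int :=
  ([10, 20], [(15, 100)], [1000], [])

def Spec_dfs (rates : List Int) (users : List (Int × Int)) (emoticons : List Int) (discounts : List Int) (out : Int × Int) : Prop := out = dfs_alt rates users emoticons discounts
instance (rates : List Int) (users : List (Int × Int)) (emoticons : List Int) (discounts : List Int) (out : Int × Int) : Decidable (Spec_dfs rates users emoticons discounts out) := by unfold Spec_dfs; infer_instance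

-- ===== CLAIM (what is proved, stated in full; the proofs are below) =====
def Claim_equal_dfs : Prop := ∀ (rates : List Int) (users : List (Int × Int)) (emoticons : List Int) (discounts : List Int), Dom_dfs rates users emoticons discounts → Pre_dfs rates users emoticons discounts → Spec_dfs rates users emoticons discounts (dfs rates users emoticons discounts)

-- ===== LEMMAS AND PROOFS =====

-- `tie` is the (lexicographic, last-wins-on-ties) max that both folds compute.
def tie (b s : Int × Int) : Int × Int := if b.1 < s.1 ∨ (b.1 = s.1 ∧ b.2 ≤ s.2) then s else b

theorem tie_comm (a b : Int × Int) : tie a b = tie b a := by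
  obtain ⟨a1, a2⟩ := a; obtain ⟨b1, b2⟩ := b
  simp only [tie]; split_ifs <;> simp_all [Prod.ext_iff] <;> omega

theorem tie_assoc (a b c : Int × Int) : tie (tie a b) c = tie a (tie b c) := by
  obtain ⟨a1, a2⟩ := a; obtain ⟨b1, b2⟩ := b; obtain ⟨c1, c2⟩ := c
  simp only [tie]; split_ifs <;> simp_all [Prod.ext_iff] <;> omega

theorem tieA_eq (b s : Int × Int) :
    (if b.1 < s.1 then s else if b.1 = s.1 ∧ b.2 ≤ s.2 then (b.1, s.2) else b) = tie b s := by
  obtain ⟨b1, b2⟩ := b; obtain ⟨s1, s2⟩ := s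
  simp only [tie]; split_ifs <;> simp_all [Prod.ext_iff] <;> omega

theorem foldl_tie_shift (xs : List (Int × Int)) : ∀ (z a : Int × Int),
    xs.foldl tie (tie z a) = tie a (xs.foldl tie z) := by
  induction xs with
  | nil => intro z a; exact tie_comm z a
  | cons x xs ih =>
    intro z a
    simp only [List.foldl_cons]
    rw [show tie (tie z a) x = tie (tie z x) a by
      rw [tie_assoc, tie_comm a x, ← tie_assoc]]
    exact ih (tie z x) a

-- "z is at least (0,0)", phrased equationally.
def zle (z : Int × Int) : Prop := tie (0, 0) z = z

theorem zle_zero : zle (0, 0) := by simp [zle, tie]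

theorem zle_tie (z x : Int × Int) (h : zle z) : zle (tie z x) := by
  unfold zle at *
  rw [← tie_assoc, h]

theorem zle_foldl (xs : List (Int × Int)) : ∀ z, zle z → zle (xs.foldl tie z) := by
  induction xs with
  | nil => intro z h; exact h
  | cons x xs ih => intro z h; exact ih (tie z x) (zle_tie z x h)

theorem foldl_tie_absorb (xs : List (Int × Int)) (z : Int × Int) (h : zle z) :
    tie z (xs.foldl tie (0, 0)) = xs.foldl tie z := by
  conv_rhs => rw [← h]
  rw [foldl_tie_shift]

theorem foldl_tie_flatMap {α : Type} (xs : List α) (g : α → List (Int × Int)) : ∀ (z : Int × Int), zle z →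
    xs.foldl (fun b x => tie b ((g x).foldl tie (0, 0))) z = (xs.flatMap g).foldl tie z := by
  induction xs with
  | nil => intro z _; rfl
  | cons x xs ih =>
    intro z hz
    simp only [List.foldl_cons, List.flatMap_cons, List.foldl_append]
    rw [foldl_tie_absorb _ z hz]
    exact ih _ (zle_foldl _ z hz)

theorem flatMap_single {α β : Type} (l : List α) (f : α → β) :
    l.flatMap (fun x => [f x]) = l.map f := by
  induction l <;> simp_all

theorem flatMap_assoc' {α β γ : Type} (l : List α) (f : α → List β) (g : β → List γ) :
    (l.flatMap f).flatMap g = l.flatMap (fun x => (f x).flatMap g) := by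
  induction l <;> simp_all

-- all length-k tuples over `rates`, in A's (depth-first = lexicographic) order
def combos (rates : List Int) : Nat → List (List Int)
  | 0 => [[]]
  | k + 1 => rates.flatMap (fun r => (combos rates k).map (fun c => r :: c))

theorem combos_one (rates : List Int) : combos rates 1 = rates.map (fun r => [r]) :=
  flatMap_single rates (fun r => [r])

theorem combos_snoc (rates : List Int) : ∀ k,
    combos rates (k + 1) = (combos rates k).flatMap (fun c => rates.map (fun r => c ++ [r])) := by
  intro k
  induction k with
  | zero =>
    rw [combos_one, show combos rates 0 = [[]] from rfl,
      List.flatMap_cons, List.flatMap_nil, List.append_nil]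
    simp
  | succ k ih =>
    conv_lhs =>
      rw [show combos rates (k + 2)
            = rates.flatMap (fun r => (combos rates (k + 1)).map (fun c => r :: c)) from rfl, ih]
    conv_rhs =>
      rw [show combos rates (k + 1)
            = rates.flatMap (fun r => (combos rates k).map (fun c => r :: c)) from rfl]
    rw [flatMap_assoc']
    simp [List.flatMap_map, List.map_flatMap, List.map_map, Function.comp_def]

theorem range_mul_flatMap {α : Type} (n : Nat) (f : Nat → α) : ∀ (m : Nat),
    (List.range (m * n)).map f
      = (List.range m).flatMap (fun q => (List.range n).map (fun r => f (q * n + r))) := by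
  intro m
  induction m with
  | zero => simp
  | succ m ih =>
    rw [Nat.succ_mul, List.range_add, List.map_append, ih, List.range_succ, List.flatMap_append]
    simp [List.map_map, Function.comp_def]

theorem map_range_getD (l : List Int) {α : Type} (g : Int → α) :
    (List.range l.length).map (fun i => g (l.getD i 0)) = l.map g := by
  induction l with
  | nil => rfl
  | cons x l ih =>
    simp only [List.length_cons, List.range_succ_eq_map, List.map_cons, List.map_map,
      Function.comp_def, List.getD_cons_zero, List.getD_cons_succ, List.map_cons] at *
    rw [ih]

theorem decode_combos (rates : List Int) : ∀ k,
    (List.range (rates.length ^ k)).map (fun c => (digitsLoop rates k c).reverse)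
      = combos rates k := by
  intro k
  induction k with
  | zero => simp [digitsLoop, combos]
  | succ k ih =>
    rcases Nat.eq_zero_or_pos rates.length with hn | hn
    · have hrates : rates = [] := List.length_eq_zero_iff.mp hn
      subst hrates
      simp [combos, pow_succ, hn]
    · rw [pow_succ, range_mul_flatMap, combos_snoc, ← ih, List.flatMap_map]
      apply List.flatMap_congr
      intro q _
      rw [← map_range_getD rates (fun r => (digitsLoop rates k q).reverse ++ [r])]
      apply List.map_congr_left
      intro r hr
      have hrlt : r < rates.length := List.mem_range.mp hr
      simp only [digitsLoop, List.reverse_cons]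
      rw [Nat.mul_comm q rates.length, Nat.mul_add_mod, Nat.mod_eq_of_lt hrlt,
        Nat.mul_add_div hn, Nat.div_eq_of_lt hrlt, Nat.add_zero]

-- characterization of A's recursion as a tie-fold over all completions
theorem A_char (rates : List Int) (users : List (Int × Int)) (emoticons : List Int) : ∀ (k fuel : Nat) (d : List Int),
    d.length + k = emoticons.length → k < fuel →
    dfsFuel fuel rates users emoticons d =
      if k = 0 then calcPy users emoticons d
      else ((combos rates k).map (fun c => calcPy users emoticons (d ++ c))).foldl tie (0, 0) := by
  intro k
  induction k with
  | zero =>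
    intro fuel d hlen hfuel
    match fuel, hfuel with
    | fuel + 1, _ =>
      simp only [dfsFuel]
      rw [if_pos (show d.length = emoticons.length by omega)]
      simp
  | succ k ih =>
    intro fuel d hlen hfuel
    match fuel, hfuel with
    | fuel + 1, hfuel =>
      simp only [dfsFuel]
      rw [if_neg (show ¬ d.length = emoticons.length by omega), if_neg (by omega)]
      have hbody : ∀ (b : Int × Int), ∀ r ∈ rates,
          (fun (best : Int × Int) (r : Int) =>
            let s := dfsFuel fuel rates users emoticons (d ++ [r])
            if best.1 < s.1 then s
            else if best.1 = s.1 ∧ best.2 ≤ s.2 then (best.1, s.2)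
            else best) b r
          = (fun (best : Int × Int) (r : Int) =>
              tie best (if k = 0 then calcPy users emoticons (d ++ [r])
                else ((combos rates k).map
                  (fun c => calcPy users emoticons ((d ++ [r]) ++ c))).foldl tie (0, 0))) b r := by
        intro b r _
        have hrec := ih fuel (d ++ [r]) (by simp; omega) (by omega)
        simp only [hrec]
        exact tieA_eq b _
      rw [List.foldl_ext _ _ _ hbody]
      by_cases hk : k = 0
      · subst hk
        simp only []
        rw [combos_one, List.map_map]
        rw [List.foldl_map]
        simp
      · simp only [if_neg hk]
        have hflat : ((combos rates (k + 1)).map (fun c => calcPy users emoticons (d ++ c)))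
            = rates.flatMap (fun r => (combos rates k).map
                (fun c => calcPy users emoticons ((d ++ [r]) ++ c))) := by
          rw [show combos rates (k + 1)
                = rates.flatMap (fun r => (combos rates k).map (fun c => r :: c)) from rfl]
          rw [List.map_flatMap]
          apply List.flatMap_congr
          intro r _
          rw [List.map_map]
          apply List.map_congr_left
          intro c _
          simp [List.append_assoc]
        rw [hflat,
          ← foldl_tie_flatMap rates
            (fun r => (combos rates k).map (fun c => calcPy users emoticons ((d ++ [r]) ++ c)))
            (0, 0) zle_zero]

-- characterization of B's flat loop as the same tie-fold
theorem B_char (rates : List Int) (users : List (Int × Int)) (emoticons : List Int) (d : List Int)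
    (k : Nat) (hlen : d.length + k = emoticons.length) :
    dfs_alt rates users emoticons d =
      if k = 0 then calcPy users emoticons d
      else ((combos rates k).map (fun c => calcPy users emoticons (d ++ c))).foldl tie (0, 0) := by
  have hk : emoticons.length - d.length = k := by omega
  by_cases h0 : k = 0
  · subst h0
    simp [dfs_alt, hk]
  · simp only [dfs_alt, hk, if_neg h0]
    show (List.range (rates.length ^ k)).foldl
        (fun best code =>
          tie best (calcPy users emoticons (d ++ (digitsLoop rates k code).reverse))) (0, 0) = _
    rw [← decode_combos rates k, List.map_map, List.foldl_map]
    simp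

-- ===== VERDICT (by name: the statement is the Claim_ definition above) =====
theorem dfs_spec : Claim_equal_dfs := by
  intro rates users emoticons discounts _ hpre
  unfold Spec_dfs
  have hlen : discounts.length + (emoticons.length - discounts.length) = emoticons.length := by
    unfold Pre_dfs at hpre; omega
  rw [show dfs rates users emoticons discounts
      = dfsFuel (emoticons.length - discounts.length + 1) rates users emoticons discounts from rfl,
    A_char rates users emoticons (emoticons.length - discounts.length) _ discounts hlen (by omega),
    B_char rates users emoticons discounts (emoticons.length - discounts.length) hlen]
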